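-- pv_equiv track=rewrite | github.com/MartinEmilEshack/svg-seq-to-lottie-converter | src/cli.py | _prefix_asset_ids
-- ===== SOURCE A (Python) =====
-- def _prefix_asset_ids(assets: list, prefix: str) -> tuple[list, dict]:
--     updated_assets = []
--     id_mapping = {}
--     for asset in assets:
--         if isinstance(asset, dict) and asset.get('id'):
--             new_id = f"{prefix}_{asset['id']}"
--             id_mapping[asset['id']] = new_id
--             asset = {**asset, 'id': new_id}
--         updated_assets.append(asset)
--     return updated_assets, id_mapping
-- ===== SOURCE B (Python) =====
-- def _prefix_asset_ids(assets: list, prefix: str) -> tuple[list, dict]: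
--     if not assets:
--         return [], {}
--     asset, *rest = assets
--     tail_assets, tail_mapping = _prefix_asset_ids(rest, prefix)
--     if isinstance(asset, dict) and asset.get('id'):
--         new_id = f"{prefix}_{asset['id']}"
--         return ([{**asset, 'id': new_id}] + tail_assets,
--                 {asset['id']: new_id, **tail_mapping})
--     return [asset] + tail_assets, tail_mapping
-- ===== Notes on version B (the rewrite author's own statement) =====
-- stated objective: alternative
-- what changed: B replaces A's iterative fold that threads (updated_assets, id_mapping) accumulators with structural recursion on the list: it recurses on the tail first, then conses the head's renamed asset onto the tail's asset list and merges the head's rename into the tail's mapping via a dict merge {id: new_id, **tail_mapping}.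
import Mathlib
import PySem

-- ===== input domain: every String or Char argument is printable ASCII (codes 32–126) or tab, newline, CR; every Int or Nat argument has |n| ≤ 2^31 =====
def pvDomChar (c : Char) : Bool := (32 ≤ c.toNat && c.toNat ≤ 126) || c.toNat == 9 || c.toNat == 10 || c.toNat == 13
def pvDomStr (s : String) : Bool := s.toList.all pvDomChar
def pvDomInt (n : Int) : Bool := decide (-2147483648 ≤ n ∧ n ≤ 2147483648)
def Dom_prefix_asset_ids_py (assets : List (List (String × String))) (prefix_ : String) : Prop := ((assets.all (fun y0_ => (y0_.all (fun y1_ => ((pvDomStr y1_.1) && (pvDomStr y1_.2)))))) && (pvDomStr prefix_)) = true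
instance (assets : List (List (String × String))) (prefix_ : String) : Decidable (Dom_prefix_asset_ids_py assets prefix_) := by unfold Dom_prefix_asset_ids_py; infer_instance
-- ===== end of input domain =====

-- B replaces A's iterative accumulator loop with structural recursion on the asset list,
-- building both results front-to-back from the recursive results on the tail and merging the
-- head's rename into the tail's mapping with a dict merge; objective: alternative decomposition.

-- ===== PORT A =====
-- asset.get('id'): first-match lookup in the association list (a Python dict has unique keys)
def pvGetId (asset : List (String × String)) : Option String :=
  match asset with
  | [] => none
  | (k, v) :: rest => if k = "id" then some v else pvGetId rest

-- {**asset, 'id': new_id}: overwrite the 'id' entry in place (key present, unique in a Python dict)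
def pvSetId (asset : List (String × String)) (nid : String) : List (String × String) :=
  asset.map (fun p => if p.1 = "id" then ("id", nid) else p)

def prefix_asset_ids_py (assets : List (List (String × String))) (prefix_ : String) : (List (List (String × String))) × (List (String × String)) :=
  let r := assets.foldl
    (fun (st : List (List (String × String)) × PySem.Dict String String) asset =>
      match pvGetId asset with
      | some s =>
          if s ≠ "" then
            let new_id := prefix_ ++ "_" ++ s
            (st.1 ++ [pvSetId asset new_id], st.2.insert s new_id)
          else (st.1 ++ [asset], st.2)
      | none => (st.1 ++ [asset], st.2))
    ([], PySem.Dict.empty)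
  (r.1, r.2.items)

-- ===== PORT B =====
-- structural recursion: 'asset, *rest = assets', recurse on rest, cons the head's result on;
-- '{asset['id']: new_id, **tail_mapping}' is the singleton dict updated with the tail mapping
def prefix_asset_ids_py_alt (assets : List (List (String × String))) (prefix_ : String) : (List (List (String × String))) × (List (String × String)) :=
  match assets with
  | [] => ([], [])
  | asset :: rest =>
    let t := prefix_asset_ids_py_alt rest prefix_
    match pvGetId asset with
    | some s =>
        if s ≠ "" then
          let new_id := prefix_ ++ "_" ++ s
          ([pvSetId asset new_id] ++ t.1,
           ((PySem.Dict.empty.insert s new_id).update t.2).items)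
        else ([asset] ++ t.1, t.2)
    | none => ([asset] ++ t.1, t.2)

-- ===== PRECONDITION & SPEC =====
def Spec_prefix_asset_ids_py (assets : List (List (String × String))) (prefix_ : String) (out : (List (List (String × String))) × (List (String × String))) : Prop := out = prefix_asset_ids_py_alt assets prefix_
instance (assets : List (List (String × String))) (prefix_ : String) (out : (List (List (String × String))) × (List (String × String))) : Decidable (Spec_prefix_asset_ids_py assets prefix_ out) := by unfold Spec_prefix_asset_ids_py; infer_instance

-- ===== CLAIM (what is proved, stated in full; the proofs are below) =====
def Claim_equal_prefix_asset_ids_py : Prop := ∀ (assets : List (List (String × String))) (prefix_ : String), Dom_prefix_asset_ids_py assets prefix_ → Spec_prefix_asset_ids_py assets prefix_ (prefix_asset_ids_py assets prefix_)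

-- ===== LEMMAS AND PROOFS =====

-- the renamed id produced by an asset, if any (the shared truthiness guard)
def pvKeyOf (asset : List (String × String)) : Option String :=
  match pvGetId asset with
  | some s => if s ≠ "" then some s else none
  | none => none

def pvVal (prefix_ s : String) : String := prefix_ ++ "_" ++ s

def pvApply (prefix_ : String) (asset : List (String × String)) : List (String × String) :=
  match pvKeyOf asset with
  | some s => pvSetId asset (pvVal prefix_ s)
  | none => asset

-- the common mapping, as a recursive function of the list of keys
def pvMap (prefix_ : String) : List String → List (String × String)
  | [] => []
  | k :: ks => (k, pvVal prefix_ k) :: (pvMap prefix_ ks).filter (fun p => !(p.1 == k))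

def pvStepA (prefix_ : String) (st : List (List (String × String)) × PySem.Dict String String) (asset : List (String × String)) : List (List (String × String)) × PySem.Dict String String :=
  match pvKeyOf asset with
  | some s => (st.1 ++ [pvSetId asset (pvVal prefix_ s)], st.2.insert s (pvVal prefix_ s))
  | none => (st.1 ++ [asset], st.2)

lemma stepA_lam_eq (prefix_ : String) :
    (fun (st : List (List (String × String)) × PySem.Dict String String) (asset : List (String × String)) =>
      match pvGetId asset with
      | some s =>
          if s ≠ "" then
            let new_id := prefix_ ++ "_" ++ s
            (st.1 ++ [pvSetId asset new_id], st.2.insert s new_id)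
          else (st.1 ++ [asset], st.2)
      | none => (st.1 ++ [asset], st.2)) = pvStepA prefix_ := by
  funext st a
  unfold pvStepA pvKeyOf pvVal
  cases pvGetId a with
  | none => rfl
  | some s => by_cases h : s = "" <;> simp [h]

-- every entry of pvMap has key drawn from ks and the canonical value
lemma pvMap_mem (prefix_ : String) (ks : List String) :
    ∀ p ∈ pvMap prefix_ ks, p.1 ∈ ks ∧ p.2 = pvVal prefix_ p.1 := by
  induction ks with
  | nil => intro p hp; simp [pvMap] at hp
  | cons k ks ih =>
    intro p hp
    simp only [pvMap, List.mem_cons] at hp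
    rcases hp with h | h
    · subst h; simp
    · have := ih p (List.mem_of_mem_filter h)
      exact ⟨List.mem_cons_of_mem _ this.1, this.2⟩

lemma pvMap_nodup_keys (prefix_ : String) (ks : List String) :
    ((pvMap prefix_ ks).map (·.1)).Nodup := by
  induction ks with
  | nil => simp [pvMap]
  | cons k ks ih =>
    simp only [pvMap, List.map_cons, List.nodup_cons]
    constructor
    · intro hmem
      rcases List.mem_map.mp hmem with ⟨p, hp, hpk⟩
      have := List.of_mem_filter hp
      simp [hpk] at this
    · exact (List.Sublist.map _ List.filter_sublist).nodup ih

-- pvMap of the key list of a canonical association list reproduces it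
lemma pvMap_of_canonical (prefix_ : String) (l : List (String × String))
    (hv : ∀ p ∈ l, p.2 = pvVal prefix_ p.1) (hnd : (l.map (·.1)).Nodup) :
    pvMap prefix_ (l.map (·.1)) = l := by
  induction l with
  | nil => simp [pvMap]
  | cons p l ih =>
    simp only [List.map_cons, List.nodup_cons] at hnd
    have hp2 : p.2 = pvVal prefix_ p.1 := hv p (List.mem_cons_self ..)
    have hrest : pvMap prefix_ (l.map (·.1)) = l :=
      ih (fun q hq => hv q (List.mem_cons_of_mem _ hq)) hnd.2
    simp only [pvMap, List.map_cons, hrest]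
    have hfil : l.filter (fun q => !(q.1 == p.1)) = l := by
      apply List.filter_eq_self.mpr
      intro q hq
      have : q.1 ≠ p.1 := by
        intro h
        exact hnd.1 (h ▸ List.mem_map_of_mem hq)
      simp [this]
    rw [hfil, ← hp2]

-- a left fold of canonical inserts computes pvMap (restricted to fresh keys)
lemma foldl_insert_items (prefix_ : String) (ks : List String) :
    ∀ (d : PySem.Dict String String), d.keys.Nodup →
    (∀ p ∈ d.items, p.2 = pvVal prefix_ p.1) →
    (ks.foldl (fun d k => d.insert k (pvVal prefix_ k)) d).items
      = d.items ++ (pvMap prefix_ ks).filter (fun p => !(d.contains p.1)) := by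
  induction ks with
  | nil => intro d _ _; simp [pvMap]
  | cons k ks ih =>
    intro d hnd hv
    simp only [List.foldl_cons]
    by_cases hc : d.contains k = true
    · have hins : d.insert k (pvVal prefix_ k) = d := by
        apply PySem.Dict.ext
        rw [PySem.Dict.items_insert_of_contains d _ hc]
        conv_rhs => rw [← List.map_id d.items]
        apply List.map_congr_left
        intro p hp
        by_cases hk : p.1 = k
        · have h3 : p.2 = pvVal prefix_ p.1 := hv p hp
          simp only [id_eq, hk, beq_self_eq_true, if_true]
          rw [← hk, ← h3]
        · simp [hk]
      rw [hins, ih d hnd hv]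
      congr 1
      simp only [pvMap, List.filter_cons, hc, Bool.not_true, List.filter_filter]
      apply List.filter_congr
      intro p _
      by_cases hk : p.1 = k
      · simp [hk, hc]
      · simp [hk]
    · have hc' : d.contains k = false := by simpa using hc
      have hitems : (d.insert k (pvVal prefix_ k)).items = d.items ++ [(k, pvVal prefix_ k)] :=
        PySem.Dict.items_insert_of_not_contains d _ hc'
      have hnd' : (d.insert k (pvVal prefix_ k)).keys.Nodup :=
        PySem.Dict.nodup_keys_insert d _ _ hnd
      have hv' : ∀ p ∈ (d.insert k (pvVal prefix_ k)).items, p.2 = pvVal prefix_ p.1 := by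
        intro p hp
        rw [hitems] at hp
        rcases List.mem_append.mp hp with h | h
        · exact hv p h
        · simp at h; subst h; rfl
      rw [ih _ hnd' hv', hitems]
      simp only [pvMap, List.filter_cons, hc', Bool.not_false, List.filter_filter,
        List.append_assoc, List.cons_append, List.nil_append]
      congr 2
      apply List.filter_congr
      intro p _
      rw [PySem.Dict.contains_insert]
      by_cases hk : p.1 = k <;> simp [hk, Bool.and_comm]

-- B's merge '{s: new_id, **tail_mapping}' over a canonical tail mapping
lemma update_items (prefix_ s : String) (tm : List (String × String))
    (hv : ∀ p ∈ tm, p.2 = pvVal prefix_ p.1) (hnd : (tm.map (·.1)).Nodup) :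
    ((PySem.Dict.empty.insert s (pvVal prefix_ s)).update tm).items
      = (s, pvVal prefix_ s) :: tm.filter (fun p => !(p.1 == s)) := by
  have hfold : (PySem.Dict.empty.insert s (pvVal prefix_ s)).update tm
      = (tm.map (·.1)).foldl (fun d k => d.insert k (pvVal prefix_ k))
          (PySem.Dict.empty.insert s (pvVal prefix_ s)) := by
    show tm.foldl (fun (d : PySem.Dict String String) p => d.insert p.1 p.2) _ = _
    rw [List.foldl_map]
    apply PySem.List.foldl_congr_mem
    intro d p hp
    rw [hv p hp]
  have hd0items : (PySem.Dict.empty.insert s (pvVal prefix_ s)).items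
      = [(s, pvVal prefix_ s)] := by
    rw [PySem.Dict.items_insert_of_not_contains _ _ (PySem.Dict.contains_empty s)]
    rfl
  have hd0nd : (PySem.Dict.empty.insert s (pvVal prefix_ s)).keys.Nodup :=
    PySem.Dict.nodup_keys_insert _ _ _ PySem.Dict.nodup_keys_empty
  have hd0v : ∀ p ∈ (PySem.Dict.empty.insert s (pvVal prefix_ s)).items,
      p.2 = pvVal prefix_ p.1 := by
    intro p hp; rw [hd0items] at hp; simp at hp; subst hp; rfl
  rw [hfold, foldl_insert_items prefix_ _ _ hd0nd hd0v, hd0items,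
    pvMap_of_canonical prefix_ tm hv hnd]
  simp only [List.cons_append, List.nil_append, List.cons.injEq, true_and]
  apply List.filter_congr
  intro p _
  rw [PySem.Dict.contains_insert]
  simp [PySem.Dict.contains_empty]

-- B computes the map of renamed assets and pvMap of the keys
lemma alt_eq (prefix_ : String) (assets : List (List (String × String))) :
    prefix_asset_ids_py_alt assets prefix_
      = (assets.map (pvApply prefix_), pvMap prefix_ (assets.filterMap pvKeyOf)) := by
  induction assets with
  | nil => simp [prefix_asset_ids_py_alt, pvMap]
  | cons a rest ih =>
    rw [prefix_asset_ids_py_alt, ih]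
    cases hk : pvGetId a with
    | none =>
      have hko : pvKeyOf a = none := by unfold pvKeyOf; rw [hk]
      have hap : pvApply prefix_ a = a := by unfold pvApply; rw [hko]
      simp [hko, hap,]
    | some s =>
      by_cases hs : s = ""
      · have hko : pvKeyOf a = none := by unfold pvKeyOf; rw [hk]; simp [hs]
        have hap : pvApply prefix_ a = a := by unfold pvApply; rw [hko]
        simp [hs, hko, hap,]
      · have hko : pvKeyOf a = some s := by unfold pvKeyOf; rw [hk]; simp [hs]
        have hap : pvApply prefix_ a = pvSetId a (pvVal prefix_ s) := by
          unfold pvApply; rw [hko]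
        have hupd := update_items prefix_ s (pvMap prefix_ (rest.filterMap pvKeyOf))
          (fun p hp => (pvMap_mem prefix_ _ p hp).2) (pvMap_nodup_keys prefix_ _)
        simp only [pvVal] at hupd
        simp [hs, hko, hap, pvMap, pvVal, hupd]

-- A's fold splits into the map of renamed assets and a fold of inserts over the keys
lemma foldA_eq (prefix_ : String) (assets : List (List (String × String))) :
    ∀ (acc : List (List (String × String))) (d : PySem.Dict String String),
    assets.foldl (pvStepA prefix_) (acc, d)
      = (acc ++ assets.map (pvApply prefix_),
         (assets.filterMap pvKeyOf).foldl (fun d k => d.insert k (pvVal prefix_ k)) d) := by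
  induction assets with
  | nil => intro acc d; simp
  | cons a rest ih =>
    intro acc d
    simp only [List.foldl_cons, List.map_cons, List.filterMap_cons]
    cases hk : pvKeyOf a with
    | none =>
      have h1 : pvStepA prefix_ (acc, d) a = (acc ++ [a], d) := by unfold pvStepA; rw [hk]
      have h2 : pvApply prefix_ a = a := by unfold pvApply; rw [hk]
      rw [h1, h2, ih]
      simp
    | some s =>
      have h1 : pvStepA prefix_ (acc, d) a
          = (acc ++ [pvSetId a (pvVal prefix_ s)], d.insert s (pvVal prefix_ s)) := by
        unfold pvStepA; rw [hk]
      have h2 : pvApply prefix_ a = pvSetId a (pvVal prefix_ s) := by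
        unfold pvApply; rw [hk]
      rw [h1, h2, ih]
      simp

-- ===== VERDICT (by name: the statement is the Claim_ definition above) =====
theorem prefix_asset_ids_py_spec : Claim_equal_prefix_asset_ids_py := by
  intro assets prefix_ _
  unfold Spec_prefix_asset_ids_py prefix_asset_ids_py
  simp only [stepA_lam_eq]
  rw [foldA_eq prefix_ assets [] PySem.Dict.empty, alt_eq prefix_ assets]
  have hitems := foldl_insert_items prefix_ (assets.filterMap pvKeyOf) PySem.Dict.empty
    PySem.Dict.nodup_keys_empty (by intro p hp; exact (List.not_mem_nil hp).elim)
  simp only [List.nil_append]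
  refine Prod.ext rfl ?_
  simp only at hitems ⊢
  rw [hitems, show PySem.Dict.empty.items = ([] : List (String × String)) from rfl,
    List.nil_append,
    List.filter_congr (fun p _ => by simp [PySem.Dict.contains_empty] :
      ∀ p ∈ pvMap prefix_ (assets.filterMap pvKeyOf),
        (!PySem.Dict.empty.contains p.1) = (fun _ => true) p),
    List.filter_true]
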